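-- pv_equiv track=rewrite | github.com/mhuncovsky/adventofcode | aoc2023/day01.py | replace_first
-- ===== SOURCE A (Python) =====
-- def replace_first(line: str, words: dict[str, str]):
--     found = {}
--     for word, _ in words.items():
--         if (index := line.find(word)) >= 0:
--             if not index in found:
--                 found[index] = []
--             found[index].append(word)
--     if not found:
--         return line
--     keys = sorted(found.keys())
--     first = found[keys[0]][0]
--     return line.replace(first, words[first], 1)
-- ===== SOURCE B (Python) =====
-- def replace_first(line: str, words: dict[str, str]):
--     # single pass: keep the earliest-matching word (first in dict order on ties)
--     best = None  # (index, word)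
--     for word in words:
--         i = line.find(word)
--         if i >= 0 and (best is None or i < best[0]):
--             best = (i, word)
--     if best is None:
--         return line
--     word = best[1]
--     return line.replace(word, words[word], 1)
-- ===== Notes on version B (the rewrite author's own statement) =====
-- stated objective: simpler
-- what changed: replaces A's build-a-dict-of-index-to-words plus sorted(keys) selection with a single running-min pass over the words (strict < keeps the first word in dict order on ties)
import Mathlib
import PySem

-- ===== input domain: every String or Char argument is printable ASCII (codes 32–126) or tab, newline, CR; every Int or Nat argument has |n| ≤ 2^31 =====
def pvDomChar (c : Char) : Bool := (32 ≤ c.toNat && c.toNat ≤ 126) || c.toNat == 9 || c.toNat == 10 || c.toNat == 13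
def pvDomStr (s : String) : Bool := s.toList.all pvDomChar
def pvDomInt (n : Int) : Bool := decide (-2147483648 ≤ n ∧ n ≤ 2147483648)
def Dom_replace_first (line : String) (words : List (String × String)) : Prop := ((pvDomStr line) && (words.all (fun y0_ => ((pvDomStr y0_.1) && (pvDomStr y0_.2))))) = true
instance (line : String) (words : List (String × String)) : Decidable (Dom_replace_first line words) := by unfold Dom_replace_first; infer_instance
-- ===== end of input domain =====

-- B replaces A's index→words dict + sorted(keys) selection by one running-min pass over the words (objective: simpler).

-- shared helper: s.replace(old, new, 1) — exact, incl. old = "" (prepends new); both Pythons call this same builtin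
def pyReplace1 (s old new : String) : String :=
  let i := PySem.Str.find s old
  if 0 ≤ i then String.ofList (s.toList.take i.toNat ++ new.toList ++ s.toList.drop (i.toNat + old.toList.length))
  else s

-- ===== PORT A =====
-- A's loop body (one word of the 'for word, _ in words.items()' loop), named for use in the fold
def astep (line : String) (f : PySem.Dict Int (List String)) (w : String) : PySem.Dict Int (List String) :=
  let index := PySem.Str.find line w
  if 0 ≤ index then
    (if f.contains index then f else f.insert index ([] : List String)).modify index [] (fun l => l ++ [w])
  else f

def replace_first (line : String) (words : List (String × String)) : String :=
  let d := PySem.Dict.ofList words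
  let found := d.items.foldl (fun f wv => astep line f wv.1) PySem.Dict.empty
  if found.items.isEmpty then line
  else
    let keys := PySem.List.sorted found.keys (fun k => k) false
    let first := (found.getD ((PySem.List.pyGet? keys 0).getD 0) []).headD ""
    pyReplace1 line first (d.getD first "")

-- ===== PORT B =====
-- B's loop body: running minimum (index, word); strict < keeps the first word on ties
def bstep (line : String) (b : Option (Int × String)) (w : String) : Option (Int × String) :=
  let i := PySem.Str.find line w
  if 0 ≤ i then
    match b with
    | none => some (i, w)
    | some p => if i < p.1 then some (i, w) else b
  else b

def replace_first_alt (line : String) (words : List (String × String)) : String :=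
  let d := PySem.Dict.ofList words
  let best := d.keys.foldl (bstep line) none
  match best with
  | none => line
  | some p => pyReplace1 line p.2 (d.getD p.2 "")

-- ===== PRECONDITION & SPEC =====
def Spec_replace_first (line : String) (words : List (String × String)) (out : String) : Prop := out = replace_first_alt line words
instance (line : String) (words : List (String × String)) (out : String) : Decidable (Spec_replace_first line words out) := by unfold Spec_replace_first; infer_instance

-- ===== CLAIM (what is proved, stated in full; the proofs are below) =====
def Claim_equal_replace_first : Prop := ∀ (line : String) (words : List (String × String)), Dom_replace_first line words → Spec_replace_first line words (replace_first line words)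

-- ===== LEMMAS AND PROOFS =====

-- reference: the first word (in list order) attaining the minimal nonnegative find index
def pick (line : String) : List String → Option String
  | [] => none
  | w :: ws =>
      if 0 ≤ PySem.Str.find line w then
        match pick line ws with
        | none => some w
        | some v => if PySem.Str.find line w ≤ PySem.Str.find line v then some w else some v
      else pick line ws

theorem pick_eq_none (line : String) (ws : List String) :
    pick line ws = none ↔ ∀ w ∈ ws, PySem.Str.find line w < 0 := by
  induction ws with
  | nil => simp [pick]
  | cons w t ih =>
      simp only [pick, List.mem_cons]
      split_ifs with h
      · constructor
        · intro hc
          exfalso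
          cases hp : pick line t with
          | none => rw [hp] at hc; dsimp only at hc; simp at hc
          | some u =>
              rw [hp] at hc
              dsimp only at hc
              split_ifs at hc
        · intro hall; exact absurd (hall w (Or.inl rfl)) (by omega)
      · rw [ih]
        constructor
        · intro hall u hu
          rcases hu with rfl | hu
          · omega
          · exact hall u hu
        · intro hall u hu; exact hall u (Or.inr hu)

theorem pick_mem_nonneg (line : String) (ws : List String) (v : String)
    (h : pick line ws = some v) : v ∈ ws ∧ 0 ≤ PySem.Str.find line v := by
  induction ws generalizing v with
  | nil => exact absurd h (by simp [pick])
  | cons w t ih =>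
      simp only [pick] at h
      split_ifs at h with h0
      · cases hp : pick line t with
        | none =>
            rw [hp] at h
            dsimp only at h
            injection h with h; subst h
            exact ⟨List.mem_cons_self, h0⟩
        | some u =>
            rw [hp] at h
            dsimp only at h
            split_ifs at h with h1 <;> injection h with h <;> subst h
            · exact ⟨List.mem_cons_self, h0⟩
            · rcases ih _ hp with ⟨hm, hn⟩; exact ⟨List.mem_cons_of_mem _ hm, hn⟩
      · rcases ih _ h with ⟨hm, hn⟩; exact ⟨List.mem_cons_of_mem _ hm, hn⟩

theorem pick_min (line : String) (ws : List String) (v : String)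
    (h : pick line ws = some v) :
    ∀ w ∈ ws, 0 ≤ PySem.Str.find line w → PySem.Str.find line v ≤ PySem.Str.find line w := by
  induction ws generalizing v with
  | nil => exact absurd h (by simp [pick])
  | cons w t ih =>
      intro u hu h0u
      simp only [pick] at h
      split_ifs at h with hw
      · cases hp : pick line t with
        | none =>
            rw [hp] at h
            dsimp only at h
            injection h with h; subst h
            rcases List.mem_cons.mp hu with rfl | hut
            · omega
            · exact absurd ((pick_eq_none line t).mp hp u hut) (by omega)
        | some x =>
            rw [hp] at h
            dsimp only at h
            split_ifs at h with h1 <;> injection h with h <;> subst h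
            · rcases List.mem_cons.mp hu with rfl | hut
              · omega
              · exact le_trans h1 (ih _ hp u hut h0u)
            · rcases List.mem_cons.mp hu with rfl | hut
              · omega
              · exact ih _ hp u hut h0u
      · rcases List.mem_cons.mp hu with rfl | hut
        · omega
        · exact ih _ h u hut h0u

theorem pick_first (line : String) (ws : List String) (v : String)
    (h : pick line ws = some v) :
    (ws.filter (fun w => PySem.Str.find line w == PySem.Str.find line v)).head? = some v := by
  induction ws generalizing v with
  | nil => exact absurd h (by simp [pick])
  | cons w t ih =>
      simp only [pick] at h
      split_ifs at h with hw
      · cases hp : pick line t with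
        | none =>
            rw [hp] at h
            dsimp only at h
            injection h with h; subst h
            rw [List.filter_cons_of_pos (by rw [beq_iff_eq])]
            rfl
        | some u =>
            rw [hp] at h
            dsimp only at h
            split_ifs at h with h1 <;> injection h with h <;> subst h
            · rw [List.filter_cons_of_pos (by rw [beq_iff_eq])]
              rfl
            · have hne : (PySem.Str.find line w == PySem.Str.find line u) = false := by
                rw [beq_eq_false_iff_ne]; omega
              rw [List.filter_cons_of_neg (by rw [hne]; exact Bool.false_ne_true)]
              exact ih _ hp
      · have hn := (pick_mem_nonneg line t v h).2
        have hne : (PySem.Str.find line w == PySem.Str.find line v) = false := by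
          rw [beq_eq_false_iff_ne]; omega
        rw [List.filter_cons_of_neg (by rw [hne]; exact Bool.false_ne_true)]
        exact ih _ h

-- B's fold with a some-accumulator is a running min against that accumulator
theorem bfold_some (line : String) (ws : List String) (i : Int) (w : String) :
    ws.foldl (bstep line) (some (i, w)) =
      match pick line ws with
      | none => some (i, w)
      | some v => if PySem.Str.find line v < i then some (PySem.Str.find line v, v) else some (i, w) := by
  induction ws generalizing i w with
  | nil => simp [pick]
  | cons u t ih =>
      rw [List.foldl_cons]
      have hb : bstep line (some (i, w)) u =
          if 0 ≤ PySem.Str.find line u then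
            (if PySem.Str.find line u < i then some (PySem.Str.find line u, u) else some (i, w))
          else some (i, w) := rfl
      rw [hb]
      by_cases hu : 0 ≤ PySem.Str.find line u
      · rw [if_pos hu]
        by_cases hlt : PySem.Str.find line u < i
        · rw [if_pos hlt, ih]
          cases hp : pick line t with
          | none =>
              have hpc : pick line (u :: t) = some u := by
                simp only [pick]; rw [if_pos hu, hp]
              rw [hpc]
              dsimp only
              rw [if_pos hlt]
          | some x =>
              by_cases hxu : PySem.Str.find line u ≤ PySem.Str.find line x
              · have hpc : pick line (u :: t) = some u := by
                  simp only [pick]; rw [if_pos hu, hp]; dsimp only; rw [if_pos hxu]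
                rw [hpc]
                dsimp only
                rw [if_neg (show ¬ PySem.Str.find line x < PySem.Str.find line u by omega),
                    if_pos hlt]
              · have hpc : pick line (u :: t) = some x := by
                  simp only [pick]; rw [if_pos hu, hp]; dsimp only; rw [if_neg hxu]
                rw [hpc]
                dsimp only
                rw [if_pos (show PySem.Str.find line x < PySem.Str.find line u by omega),
                    if_pos (show PySem.Str.find line x < i by omega)]
        · rw [if_neg hlt, ih]
          cases hp : pick line t with
          | none =>
              have hpc : pick line (u :: t) = some u := by
                simp only [pick]; rw [if_pos hu, hp]
              rw [hpc]
              dsimp only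
              rw [if_neg hlt]
          | some x =>
              by_cases hxu : PySem.Str.find line u ≤ PySem.Str.find line x
              · have hpc : pick line (u :: t) = some u := by
                  simp only [pick]; rw [if_pos hu, hp]; dsimp only; rw [if_pos hxu]
                rw [hpc]
                dsimp only
                rw [if_neg (show ¬ PySem.Str.find line x < i by omega), if_neg hlt]
              · have hpc : pick line (u :: t) = some x := by
                  simp only [pick]; rw [if_pos hu, hp]; dsimp only; rw [if_neg hxu]
                rw [hpc]
      · rw [if_neg hu, ih]
        have hpc : pick line (u :: t) = pick line t := by
          simp only [pick]; rw [if_neg hu]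
        rw [hpc]

theorem bfold_none (line : String) (ws : List String) :
    ws.foldl (bstep line) none = (pick line ws).map (fun v => (PySem.Str.find line v, v)) := by
  induction ws with
  | nil => simp [pick]
  | cons w t ih =>
      rw [List.foldl_cons]
      have hb : bstep line none w =
          if 0 ≤ PySem.Str.find line w then some (PySem.Str.find line w, w) else none := rfl
      rw [hb]
      by_cases hw : 0 ≤ PySem.Str.find line w
      · rw [if_pos hw, bfold_some]
        cases hp : pick line t with
        | none =>
            have hpc : pick line (w :: t) = some w := by
              simp only [pick]; rw [if_pos hw, hp]
            rw [hpc]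
            rfl
        | some v =>
            by_cases hvw : PySem.Str.find line w ≤ PySem.Str.find line v
            · have hpc : pick line (w :: t) = some w := by
                simp only [pick]; rw [if_pos hw, hp]; dsimp only; rw [if_pos hvw]
              rw [hpc]
              dsimp only
              rw [if_neg (show ¬ PySem.Str.find line v < PySem.Str.find line w by omega)]
              rfl
            · have hpc : pick line (w :: t) = some v := by
                simp only [pick]; rw [if_pos hw, hp]; dsimp only; rw [if_neg hvw]
              rw [hpc]
              dsimp only
              rw [if_pos (show PySem.Str.find line v < PySem.Str.find line w by omega)]
              rfl
      · rw [if_neg hw, ih]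
        have hpc : pick line (w :: t) = pick line t := by
          simp only [pick]; rw [if_neg hw]
        rw [hpc]

theorem astep_of_neg (line : String) (f : PySem.Dict Int (List String)) (w : String)
    (h : PySem.Str.find line w < 0) : astep line f w = f := by
  simp only [astep]; rw [if_neg (by omega)]

theorem astep_contains (line : String) (f : PySem.Dict Int (List String)) (w : String) (i : Int)
    (hw : 0 ≤ PySem.Str.find line w) :
    (astep line f w).contains i = ((i == PySem.Str.find line w) || f.contains i) := by
  simp only [astep]
  rw [if_pos hw]
  by_cases hc : f.contains (PySem.Str.find line w) = true
  · rw [if_pos hc, PySem.Dict.contains_modify]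
  · rw [if_neg hc, PySem.Dict.contains_modify, PySem.Dict.contains_insert]
    cases hb : (i == PySem.Str.find line w) <;>
      simp only [Bool.false_or, Bool.true_or]

theorem astep_getD (line : String) (f : PySem.Dict Int (List String)) (w : String) (i : Int)
    (hw : 0 ≤ PySem.Str.find line w) :
    (astep line f w).getD i [] =
      if i = PySem.Str.find line w then f.getD (PySem.Str.find line w) [] ++ [w] else f.getD i [] := by
  simp only [astep]
  rw [if_pos hw, PySem.Dict.getD_modify]
  by_cases hc : f.contains (PySem.Str.find line w) = true
  · rw [if_pos hc]
  · rw [if_neg hc]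
    by_cases hi : i = PySem.Str.find line w
    · rw [if_pos hi, if_pos hi, PySem.Dict.getD_insert, if_pos rfl,
          PySem.Dict.getD_of_not_contains _ _ (by simp_all)]
    · rw [if_neg hi, if_neg hi, PySem.Dict.getD_insert, if_neg hi]

theorem afold_contains (line : String) (ws : List String) (f : PySem.Dict Int (List String)) (i : Int) :
    (ws.foldl (astep line) f).contains i =
      (f.contains i || ws.any (fun w => decide (0 ≤ PySem.Str.find line w) && (PySem.Str.find line w == i))) := by
  induction ws generalizing f with
  | nil => simp
  | cons w t ih =>
      rw [List.foldl_cons, List.any_cons, ih]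
      by_cases hw : 0 ≤ PySem.Str.find line w
      · rw [astep_contains line f w i hw, decide_eq_true hw, Bool.true_and, Bool.beq_comm]
        cases hb : (PySem.Str.find line w == i) <;> cases hc2 : f.contains i <;>
          cases ha : t.any (fun w => decide (0 ≤ PySem.Str.find line w) && (PySem.Str.find line w == i)) <;>
          rfl
      · rw [astep_of_neg line f w (by omega), decide_eq_false hw, Bool.false_and, Bool.false_or]

theorem afold_getD (line : String) (ws : List String) (f : PySem.Dict Int (List String)) (i : Int) :
    (ws.foldl (astep line) f).getD i [] =
      f.getD i [] ++ ws.filter (fun w => decide (0 ≤ PySem.Str.find line w) && (PySem.Str.find line w == i)) := by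
  induction ws generalizing f with
  | nil => simp
  | cons w t ih =>
      rw [List.foldl_cons, ih]
      by_cases hw : 0 ≤ PySem.Str.find line w
      · rw [astep_getD line f w i hw]
        by_cases he : PySem.Str.find line w = i
        · rw [if_pos he.symm, List.filter_cons_of_pos
            (by rw [decide_eq_true hw, Bool.true_and, beq_iff_eq]; exact he), he,
            List.append_assoc, List.singleton_append]
        · rw [if_neg (fun hh => he hh.symm), List.filter_cons_of_neg
            (by rw [decide_eq_true hw, Bool.true_and, beq_eq_false_iff_ne.mpr he]; exact Bool.false_ne_true)]
      · rw [astep_of_neg line f w (by omega), List.filter_cons_of_neg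
          (by rw [decide_eq_false hw, Bool.false_and]; exact Bool.false_ne_true)]

theorem afold_all_neg (line : String) (ws : List String) (f : PySem.Dict Int (List String))
    (h : ∀ w ∈ ws, PySem.Str.find line w < 0) : ws.foldl (astep line) f = f := by
  induction ws generalizing f with
  | nil => rfl
  | cons w t ih =>
      rw [List.foldl_cons, astep_of_neg line f w (h w List.mem_cons_self),
          ih _ (fun u hu => h u (List.mem_cons_of_mem _ hu))]

theorem main_eq (line : String) (words : List (String × String)) :
    replace_first line words = replace_first_alt line words := by
  simp only [replace_first, replace_first_alt]
  set d := PySem.Dict.ofList words with hd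
  have hA : d.items.foldl (fun f wv => astep line f wv.1) PySem.Dict.empty
      = (d.items.map Prod.fst).foldl (astep line) PySem.Dict.empty :=
    List.foldl_map.symm
  have hkeys : d.keys = d.items.map Prod.fst := rfl
  rw [hA, hkeys]
  set ws := d.items.map Prod.fst with hws
  rw [bfold_none]
  cases hp : pick line ws with
  | none =>
      rw [afold_all_neg line ws _ ((pick_eq_none line ws).mp hp)]
      rfl
  | some v =>
      rcases pick_mem_nonneg line ws v hp with ⟨hvmem, hvnn⟩
      have hcont : (ws.foldl (astep line) PySem.Dict.empty).contains (PySem.Str.find line v) = true := by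
        rw [afold_contains]
        rw [PySem.Dict.contains_empty, Bool.false_or, List.any_eq_true]
        exact ⟨v, hvmem, by rw [decide_eq_true hvnn, Bool.true_and, beq_self_eq_true]⟩
      have hmk : PySem.Str.find line v ∈ (ws.foldl (astep line) PySem.Dict.empty).keys :=
        (PySem.Dict.contains_iff_mem_keys _ _).mp hcont
      have hkne : (ws.foldl (astep line) PySem.Dict.empty).keys ≠ [] := by
        intro h; rw [h] at hmk; exact List.not_mem_nil hmk
      have hine : ((ws.foldl (astep line) PySem.Dict.empty).items.isEmpty) = false := by
        rw [List.isEmpty_eq_false_iff]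
        intro h
        exact hkne (by simp only [PySem.Dict.keys, h, List.map_nil])
      rw [hine]
      simp only [Bool.false_eq_true, if_false]
      obtain ⟨h, t, hsrt⟩ : ∃ h t, PySem.List.sorted (ws.foldl (astep line) PySem.Dict.empty).keys (fun k => k) false = h :: t := by
        cases hs : PySem.List.sorted (ws.foldl (astep line) PySem.Dict.empty).keys (fun k => k) false with
        | nil => exact absurd ((PySem.List.sorted_eq_nil_iff _ _ _).mp hs) hkne
        | cons a b => exact ⟨a, b, rfl⟩
      have hhm : h = PySem.Str.find line v := by
        have h1 : h ≤ PySem.Str.find line v := PySem.List.key_head_sorted_le _ _ hsrt _ hmk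
        have hhk : h ∈ (ws.foldl (astep line) PySem.Dict.empty).keys := by
          have hmem : h ∈ PySem.List.sorted (ws.foldl (astep line) PySem.Dict.empty).keys (fun k => k) false := by
            rw [hsrt]; exact List.mem_cons_self
          exact (PySem.List.mem_sorted _ _ _ _).mp hmem
        have hch := (PySem.Dict.contains_iff_mem_keys _ _).mpr hhk
        rw [afold_contains, PySem.Dict.contains_empty, Bool.false_or, List.any_eq_true] at hch
        obtain ⟨u, hu, hcu⟩ := hch
        rw [Bool.and_eq_true, decide_eq_true_eq, beq_iff_eq] at hcu
        have h2 : PySem.Str.find line v ≤ h := hcu.2 ▸ pick_min line ws v hp u hu hcu.1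
        omega
      rw [hsrt]
      have hget0 : (PySem.List.pyGet? (h :: t) (0 : Int)).getD 0 = h := by
        simp [PySem.List.pyGet?, PySem.List.pyIdx?]
      rw [hget0, hhm, afold_getD]
      have hfil : (ws.filter (fun w => decide (0 ≤ PySem.Str.find line w) && (PySem.Str.find line w == PySem.Str.find line v)))
          = ws.filter (fun w => PySem.Str.find line w == PySem.Str.find line v) := by
        apply List.filter_congr
        intro u _
        by_cases he : PySem.Str.find line u = PySem.Str.find line v
        · rw [beq_iff_eq.mpr he, Bool.and_true, decide_eq_true (he ▸ hvnn)]
        · rw [beq_eq_false_iff_ne.mpr he, Bool.and_false]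
      rw [hfil]
      have hhead := pick_first line ws v hp
      cases hf : ws.filter (fun w => PySem.Str.find line w == PySem.Str.find line v) with
      | nil => rw [hf] at hhead; exact absurd hhead (by simp)
      | cons a l =>
          rw [hf] at hhead
          injection hhead with hhead
          rw [show (PySem.Dict.getD PySem.Dict.empty (PySem.Str.find line v) ([] : List String)) = [] from rfl,
              List.nil_append, List.headD_cons, hhead]
          rfl

-- ===== VERDICT (by name: the statement is the Claim_ definition above) =====
theorem replace_first_spec : Claim_equal_replace_first := by
  intro line words _
  unfold Spec_replace_first
  exact main_eq line words
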